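-- pv_equiv track=rewrite | github.com/Allenjin123/eQual | experiments/phase_ordering/eval_experiments.py | is_valid_ordering
-- ===== SOURCE A (Python) =====
-- def compute_transitive_deps(name, deps_map, cache=None):
--     if cache is None:
--         cache = {}
--     if name in cache:
--         return cache[name]
--     result = set()
--     for dep in deps_map.get(name, []):
--         result.add(dep)
--         result |= compute_transitive_deps(dep, deps_map, cache)
--     cache[name] = result
--     return result
--
-- def is_valid_ordering(ordering, deps_map):
--     pos = {name: i for i, name in enumerate(ordering)}
--     cache = {}
--     for name in ordering:
--         for dep in compute_transitive_deps(name, deps_map, cache):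
--             if dep in pos and pos[dep] >= pos[name]:
--                 return False
--     return True
-- ===== SOURCE B (Python) =====
-- def is_valid_ordering(ordering, deps_map):
--     # Single memoized DFS: best[x] = max position (in `ordering`) of any node
--     # reachable from x, including x itself; -1 if none of them is in `ordering`.
--     pos = {name: i for i, name in enumerate(ordering)}
--     best = {}
--
--     def max_reach_pos(x):
--         if x in best:
--             return best[x]
--         m = pos.get(x, -1)
--         for d in deps_map.get(x, []):
--             r = max_reach_pos(d)
--             if r > m:
--                 m = r
--         best[x] = m
--         return m
--
--     for name in ordering:
--         p = pos[name]
--         for d in deps_map.get(name, []):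
--             if max_reach_pos(d) >= p:
--                 return False
--     return True
-- ===== Notes on version B (the rewrite author's own statement) =====
-- stated objective: alternative
-- what changed: Replaces A's per-node transitive-closure SETS (repeated set unions per memoized call, then a scan of each closure set) by a single memoized DFS that propagates one integer per node: the maximum ordering position reachable from it.
-- outside the precondition, e.g. on is_valid_ordering(['a', 'b', 'c'], {'a': ['b'], 'c': ['c']}): A returns False, B returns False
import Mathlib
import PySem

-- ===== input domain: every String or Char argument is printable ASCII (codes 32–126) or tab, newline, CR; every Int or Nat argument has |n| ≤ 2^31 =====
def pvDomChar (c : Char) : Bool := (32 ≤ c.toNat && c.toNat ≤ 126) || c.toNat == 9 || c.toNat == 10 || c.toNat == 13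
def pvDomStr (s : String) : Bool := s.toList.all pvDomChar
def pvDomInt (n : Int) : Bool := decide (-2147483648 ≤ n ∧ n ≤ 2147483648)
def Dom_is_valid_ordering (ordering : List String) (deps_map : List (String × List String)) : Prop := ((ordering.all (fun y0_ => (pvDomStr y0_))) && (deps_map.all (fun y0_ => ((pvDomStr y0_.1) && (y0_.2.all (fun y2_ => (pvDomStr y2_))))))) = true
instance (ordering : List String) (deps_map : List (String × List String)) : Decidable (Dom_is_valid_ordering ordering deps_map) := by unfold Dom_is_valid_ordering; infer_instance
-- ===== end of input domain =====

-- B replaces A's per-node transitive-closure sets by a single memoized DFS propagating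
-- one integer per node (the max reachable ordering position); objective: alternative algorithm.


-- shared helper: deps_map.get(name, []) on the association list (first match)
def depsOf (dm : List (String × List String)) (name : String) : List String :=
  match dm.find? (fun p => p.1 == name) with
  | some p => p.2
  | none => []

-- shared helper: pos = {name: i for i, name in enumerate(ordering)}  (both Pythons build it identically)
def pyPos (ordering : List String) : PySem.Dict String Int :=
  (PySem.List.enumerate ordering 0).foldl (fun d p => d.insert p.2 p.1) PySem.Dict.empty

-- ===== PORT A =====
-- compute_transitive_deps, with a fuel bound replacing Python's unbounded recursion
-- (fuel dm.length+1 never runs out on the cycle-free inputs Pre_ admits; none = RecursionError).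
mutual
def ctdA (dm : List (String × List String)) :
    Nat → String → PySem.Dict String (PySem.Set String) →
    Option (PySem.Set String × PySem.Dict String (PySem.Set String))
  | 0, _, _ => none
  | f+1, name, cache =>
    match PySem.Dict.get? cache name with
    | some r => some (r, cache)                  -- if name in cache: return cache[name]
    | none =>
      match ctdAFold dm f (depsOf dm name) PySem.Set.empty cache with
      | none => none
      | some (result, cache1) => some (result, PySem.Dict.insert cache1 name result)  -- cache[name] = result
  termination_by f _ _ => (f, 0)

def ctdAFold (dm : List (String × List String)) (f : Nat) :
    List String → PySem.Set String → PySem.Dict String (PySem.Set String) →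
    Option (PySem.Set String × PySem.Dict String (PySem.Set String))
  | [], result, cache => some (result, cache)
  | dep :: rest, result, cache =>
    let result1 := PySem.Set.add result dep      -- result.add(dep)
    match ctdA dm f dep cache with
    | none => none
    | some (sub, cache1) => ctdAFold dm f rest (PySem.Set.union result1 sub) cache1  -- result |= ...
  termination_by l _ _ => (f, l.length + 1)
end

def isvALoop (dm : List (String × List String)) (pos : PySem.Dict String Int) :
    List String → PySem.Dict String (PySem.Set String) → Bool
  | [], _ => true
  | name :: rest, cache =>
    match ctdA dm (dm.length + 1) name cache with
    | none => false                              -- unreachable under Pre_ (Python raises here)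
    | some (tdeps, cache1) =>
      let pn := PySem.Dict.getD pos name 0       -- pos[name]; name ∈ ordering, so present
      if tdeps.any (fun dep =>
           match PySem.Dict.get? pos dep with    -- dep in pos and pos[dep] >= pos[name]
           | some pd => pn ≤ pd
           | none => false)
      then false
      else isvALoop dm pos rest cache1

def is_valid_ordering (ordering : List String) (deps_map : List (String × List String)) : Bool :=
  isvALoop deps_map (pyPos ordering) ordering PySem.Dict.empty

-- ===== PORT B =====
-- max_reach_pos: memoized DFS, m = max position reachable from x (incl. x), -1 if none in pos.
mutual
def mrpB (dm : List (String × List String)) (pos : PySem.Dict String Int) :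
    Nat → String → PySem.Dict String Int → Option (Int × PySem.Dict String Int)
  | 0, _, _ => none
  | f+1, x, memo =>
    match PySem.Dict.get? memo x with
    | some m => some (m, memo)                   -- if x in best: return best[x]
    | none =>
      match mrpBFold dm pos f (depsOf dm x) (PySem.Dict.getD pos x (-1)) memo with
      | none => none
      | some (m, memo1) => some (m, PySem.Dict.insert memo1 x m)  -- best[x] = m
  termination_by f _ _ => (f, 0)

def mrpBFold (dm : List (String × List String)) (pos : PySem.Dict String Int) (f : Nat) :
    List String → Int → PySem.Dict String Int → Option (Int × PySem.Dict String Int)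
  | [], m, memo => some (m, memo)
  | d :: rest, m, memo =>
    match mrpB dm pos f d memo with
    | none => none
    | some (r, memo1) => mrpBFold dm pos f rest (if m < r then r else m) memo1  -- if r > m: m = r
  termination_by l _ _ => (f, l.length + 1)
end

-- the inner 'for d in deps_map.get(name, []): if max_reach_pos(d) >= p: return False' loop
def isvBDeps (dm : List (String × List String)) (pos : PySem.Dict String Int) :
    List String → Int → PySem.Dict String Int → Option (Bool × PySem.Dict String Int)
  | [], _, memo => some (true, memo)
  | d :: rest, p, memo =>
    match mrpB dm pos (dm.length + 1) d memo with
    | none => none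
    | some (r, memo1) => if p ≤ r then some (false, memo1) else isvBDeps dm pos rest p memo1

def isvBLoop (dm : List (String × List String)) (pos : PySem.Dict String Int) :
    List String → PySem.Dict String Int → Bool
  | [], _ => true
  | name :: rest, memo =>
    match isvBDeps dm pos (depsOf dm name) (PySem.Dict.getD pos name 0) memo with
    | none => false                              -- unreachable under Pre_
    | some (false, _) => false
    | some (true, memo1) => isvBLoop dm pos rest memo1

def is_valid_ordering_alt (ordering : List String) (deps_map : List (String × List String)) : Bool :=
  isvBLoop deps_map (pyPos ordering) ordering PySem.Dict.empty

-- ===== PRECONDITION & SPEC =====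
-- bounded closure of the dependency graph, used only to state acyclicity
def stepR (dm : List (String × List String)) (S : List String) : List String :=
  (S ++ S.flatMap (fun x => depsOf dm x)).dedup

def reachIter (dm : List (String × List String)) (S : List String) : Nat → List String
  | 0 => S.dedup
  | n+1 => stepR dm (reachIter dm S n)

def reachBound (dm : List (String × List String)) (S : List String) : Nat :=
  (S ++ dm.flatMap (fun p => p.2)).length

def reachable (dm : List (String × List String)) (S : List String) : List String :=
  reachIter dm S (reachBound dm S)

-- Pre_ excludes deps graphs with a dependency cycle reachable from some ordering element:
-- there Python A's unbounded memoized recursion raises RecursionError (it can also exclude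
-- inputs where A happens to return False before touching the cyclic region; B returns there too).
def Pre_is_valid_ordering (ordering : List String) (deps_map : List (String × List String)) : Prop :=
  ∀ k ∈ reachable deps_map ordering, k ∉ reachable deps_map (depsOf deps_map k)

instance (ordering : List String) (deps_map : List (String × List String)) : Decidable (Pre_is_valid_ordering ordering deps_map) := by
  unfold Pre_is_valid_ordering; infer_instance

def pvWitness_is_valid_ordering : List String × (List (String × List String)) :=
  (["a", "b", "c"], [("b", ["a"]), ("c", ["b", "a"])])

def Spec_is_valid_ordering (ordering : List String) (deps_map : List (String × List String)) (out : Bool) : Prop := out = is_valid_ordering_alt ordering deps_map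
instance (ordering : List String) (deps_map : List (String × List String)) (out : Bool) : Decidable (Spec_is_valid_ordering ordering deps_map out) := by unfold Spec_is_valid_ordering; infer_instance

-- ===== CLAIM (what is proved, stated in full; the proofs are below) =====
def Claim_equal_is_valid_ordering : Prop := ∀ (ordering : List String) (deps_map : List (String × List String)), Dom_is_valid_ordering ordering deps_map → Pre_is_valid_ordering ordering deps_map → Spec_is_valid_ordering ordering deps_map (is_valid_ordering ordering deps_map)

-- ===== LEMMAS AND PROOFS =====

-- ≥1-step reachability in the dependency graph
inductive Rp (dm : List (String × List String)) : String → String → Prop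
  | single {x y : String} : y ∈ depsOf dm x → Rp dm x y
  | head {x y z : String} : y ∈ depsOf dm x → Rp dm y z → Rp dm x z

theorem Rp_iff {dm : List (String × List String)} {x z : String} :
    Rp dm x z ↔ ∃ y ∈ depsOf dm x, y = z ∨ Rp dm y z := by
  constructor
  · intro h
    cases h with
    | single h => exact ⟨z, h, Or.inl rfl⟩
    | head h h2 => exact ⟨_, h, Or.inr h2⟩
  · rintro ⟨y, hy, rfl | h⟩
    · exact Rp.single hy
    · exact Rp.head hy h

-- "no cycle is reachable from x (including at x itself)"
def NoCyc (dm : List (String × List String)) (x : String) : Prop :=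
  ∀ y, (y = x ∨ Rp dm x y) → ¬ Rp dm y y

theorem NoCyc_dep {dm : List (String × List String)} {x d : String}
    (h : NoCyc dm x) (hd : d ∈ depsOf dm x) : NoCyc dm d := by
  intro y hy
  apply h y
  rcases hy with rfl | hy
  · exact Or.inr (Rp.single hd)
  · exact Or.inr (Rp.head hd hy)

-- ---- the bounded closure used by Pre_ ----
theorem mem_stepR {dm : List (String × List String)} {S : List String} {y : String} :
    y ∈ stepR dm S ↔ y ∈ S ∨ ∃ x ∈ S, y ∈ depsOf dm x := by
  simp [stepR, List.mem_dedup]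

theorem nodup_stepR (dm : List (String × List String)) (S : List String) :
    (stepR dm S).Nodup := List.nodup_dedup _

theorem nodup_reachIter (dm : List (String × List String)) (S : List String) :
    ∀ n, (reachIter dm S n).Nodup
  | 0 => List.nodup_dedup _
  | n+1 => nodup_stepR dm _

theorem subset_stepR (dm : List (String × List String)) (S : List String) :
    S ⊆ stepR dm S := by
  intro y hy; exact mem_stepR.mpr (Or.inl hy)

theorem subset_reachIter_succ (dm : List (String × List String)) (S : List String) (n : Nat) :
    reachIter dm S n ⊆ reachIter dm S (n+1) := subset_stepR dm _

theorem mem_reachIter_of_mem {dm : List (String × List String)} {S : List String} {x : String}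
    (h : x ∈ S) : ∀ n, x ∈ reachIter dm S n
  | 0 => List.mem_dedup.mpr h
  | n+1 => subset_reachIter_succ dm S n (mem_reachIter_of_mem h n)

theorem mem_depsOf_flat {dm : List (String × List String)} {x y : String}
    (h : y ∈ depsOf dm x) : y ∈ dm.flatMap (fun p => p.2) := by
  unfold depsOf at h
  rcases hf : dm.find? (fun p => p.1 == x) with _ | p
  · rw [hf] at h; simp at h
  · rw [hf] at h
    exact List.mem_flatMap.mpr ⟨p, List.mem_of_find?_eq_some hf, h⟩

theorem reachIter_subset_univ (dm : List (String × List String)) (S : List String) :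
    ∀ n, reachIter dm S n ⊆ S ++ dm.flatMap (fun p => p.2)
  | 0 => by intro y hy; exact List.mem_append_left _ (List.mem_dedup.mp hy)
  | n+1 => by
    intro y hy
    rcases mem_stepR.mp hy with hy | ⟨x, hx, hy⟩
    · exact reachIter_subset_univ dm S n hy
    · exact List.mem_append_right _ (mem_depsOf_flat hy)

theorem length_reachIter_le (dm : List (String × List String)) (S : List String) (n : Nat) :
    (reachIter dm S n).length ≤ reachBound dm S := by
  have h1 : (reachIter dm S n).toFinset.card = (reachIter dm S n).length :=
    List.toFinset_card_of_nodup (nodup_reachIter dm S n)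
  have h2 : (reachIter dm S n).toFinset ⊆ (S ++ dm.flatMap (fun p => p.2)).toFinset := by
    intro y hy
    exact List.mem_toFinset.mpr (reachIter_subset_univ dm S n (List.mem_toFinset.mp hy))
  calc (reachIter dm S n).length = (reachIter dm S n).toFinset.card := h1.symm
    _ ≤ (S ++ dm.flatMap (fun p => p.2)).toFinset.card := Finset.card_le_card h2
    _ ≤ (S ++ dm.flatMap (fun p => p.2)).length := List.toFinset_card_le _
    _ = reachBound dm S := rfl

def StableAt (dm : List (String × List String)) (S : List String) (n : Nat) : Prop :=
  ∀ y, y ∈ reachIter dm S (n+1) ↔ y ∈ reachIter dm S n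

theorem stepR_congr {dm : List (String × List String)} {S T : List String}
    (h : ∀ y, y ∈ S ↔ y ∈ T) : ∀ y, y ∈ stepR dm S ↔ y ∈ stepR dm T := by
  intro y
  simp only [mem_stepR]
  constructor
  · rintro (hy | ⟨x, hx, hy⟩)
    · exact Or.inl ((h y).mp hy)
    · exact Or.inr ⟨x, (h x).mp hx, hy⟩
  · rintro (hy | ⟨x, hx, hy⟩)
    · exact Or.inl ((h y).mpr hy)
    · exact Or.inr ⟨x, (h x).mpr hx, hy⟩

theorem stable_propagate {dm : List (String × List String)} {S : List String} {m : Nat}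
    (h : StableAt dm S m) : ∀ k, ∀ y, y ∈ reachIter dm S (m + k) ↔ y ∈ reachIter dm S m
  | 0, y => Iff.rfl
  | k+1, y => by
    have ih := stable_propagate h k
    have : ∀ y, y ∈ reachIter dm S (m + k + 1) ↔ y ∈ reachIter dm S (m + 1) :=
      stepR_congr ih
    have := this y
    rw [show m + (k+1) = m + k + 1 by omega]
    exact this.trans (h y)

theorem length_lt_of_not_stable {dm : List (String × List String)} {S : List String} {n : Nat}
    (h : ¬ StableAt dm S n) :
    (reachIter dm S n).length < (reachIter dm S (n+1)).length := by
  have hsub := subset_reachIter_succ dm S n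
  have hex : ∃ y, y ∈ reachIter dm S (n+1) ∧ y ∉ reachIter dm S n := by
    by_contra hc
    apply h
    intro y
    constructor
    · intro hy
      by_contra hy2
      exact hc ⟨y, hy, hy2⟩
    · intro hy; exact hsub hy
  obtain ⟨y, hy1, hy2⟩ := hex
  have hss : (reachIter dm S n).toFinset ⊂ (reachIter dm S (n+1)).toFinset := by
    constructor
    · intro z hz; exact List.mem_toFinset.mpr (hsub (List.mem_toFinset.mp hz))
    · intro hback
      exact hy2 (List.mem_toFinset.mp (hback (List.mem_toFinset.mpr hy1)))
  have := Finset.card_lt_card hss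
  rwa [List.toFinset_card_of_nodup (nodup_reachIter dm S n),
       List.toFinset_card_of_nodup (nodup_reachIter dm S (n+1))] at this

theorem grow_or_stable (dm : List (String × List String)) (S : List String) :
    ∀ n, (∃ m ≤ n, StableAt dm S m) ∨ n ≤ (reachIter dm S n).length := by
  intro n
  induction n with
  | zero => exact Or.inr (Nat.zero_le _)
  | succ n ih =>
    rcases ih with ⟨m, hm, hst⟩ | hlen
    · exact Or.inl ⟨m, Nat.le_succ_of_le hm, hst⟩
    · by_cases hst : StableAt dm S n
      · exact Or.inl ⟨n, Nat.le_succ n, hst⟩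
      · exact Or.inr (Nat.lt_of_le_of_lt hlen (length_lt_of_not_stable hst))

theorem exists_stable (dm : List (String × List String)) (S : List String) :
    ∃ m, m ≤ reachBound dm S ∧ StableAt dm S m := by
  rcases grow_or_stable dm S (reachBound dm S) with ⟨m, hm, hst⟩ | hlen
  · exact ⟨m, hm, hst⟩
  · refine ⟨reachBound dm S, le_refl _, ?_⟩
    by_contra hst
    have h1 := length_lt_of_not_stable hst
    have h2 := length_reachIter_le dm S (reachBound dm S + 1)
    omega

theorem reachable_closed {dm : List (String × List String)} {S : List String} {x y : String}
    (hx : x ∈ reachable dm S) (hy : y ∈ depsOf dm x) : y ∈ reachable dm S := by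
  obtain ⟨m, hm, hst⟩ := exists_stable dm S
  have hmem : ∀ z, z ∈ reachable dm S ↔ z ∈ reachIter dm S m := by
    intro z
    have := stable_propagate hst (reachBound dm S - m) z
    rw [show m + (reachBound dm S - m) = reachBound dm S by omega] at this
    exact this
  have hx' : x ∈ reachIter dm S m := (hmem x).mp hx
  have : y ∈ reachIter dm S (m+1) := mem_stepR.mpr (Or.inr ⟨x, hx', hy⟩)
  exact (hmem y).mpr ((hst y).mp this)

theorem reachable_of_Rp {dm : List (String × List String)} {S : List String} {x y : String}
    (hx : x ∈ reachable dm S) (h : Rp dm x y) : y ∈ reachable dm S := by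
  induction h with
  | single h => exact reachable_closed hx h
  | head h _ ih => exact ih (reachable_closed hx h)

theorem mem_reachable_of_mem {dm : List (String × List String)} {S : List String} {x : String}
    (h : x ∈ S) : x ∈ reachable dm S := mem_reachIter_of_mem h _

theorem Pre_NoCyc {ordering : List String} {dm : List (String × List String)}
    (hpre : Pre_is_valid_ordering ordering dm) :
    ∀ name ∈ ordering, NoCyc dm name := by
  intro name hname y hy hcyc
  have hyr : y ∈ reachable dm ordering := by
    rcases hy with rfl | hy
    · exact mem_reachable_of_mem hname
    · exact reachable_of_Rp (mem_reachable_of_mem hname) hy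
  apply hpre y hyr
  obtain ⟨d, hd, hdy⟩ := Rp_iff.mp hcyc
  rcases hdy with rfl | hdy
  · exact mem_reachable_of_mem hd
  · exact reachable_of_Rp (mem_reachable_of_mem hd) hdy

-- ---- rank: number of map keys reachable from x (used only to bound the fuel) ----
def RKs (dm : List (String × List String)) (x : String) : Set String :=
  {k | k ∈ dm.map Prod.fst ∧ (k = x ∨ Rp dm x k)}

theorem RKs_finite (dm : List (String × List String)) (x : String) : (RKs dm x).Finite :=
  Set.Finite.subset (dm.map Prod.fst).finite_toSet (fun k hk => hk.1)

noncomputable def rk (dm : List (String × List String)) (x : String) : Nat :=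
  (RKs dm x).ncard

theorem rk_le (dm : List (String × List String)) (x : String) : rk dm x ≤ dm.length := by
  have h1 : RKs dm x ⊆ {k | k ∈ dm.map Prod.fst} := fun k hk => hk.1
  calc rk dm x ≤ Set.ncard {k : String | k ∈ dm.map Prod.fst} :=
        Set.ncard_le_ncard h1 (dm.map Prod.fst).finite_toSet
    _ = (dm.map Prod.fst).toFinset.card := by
        rw [← List.coe_toFinset]; exact Set.ncard_coe_finset _
    _ ≤ (dm.map Prod.fst).length := List.toFinset_card_le _
    _ = dm.length := List.length_map ..

theorem key_of_depsOf {dm : List (String × List String)} {x d : String}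
    (hd : d ∈ depsOf dm x) : x ∈ dm.map Prod.fst := by
  unfold depsOf at hd
  rcases hf : dm.find? (fun p => p.1 == x) with _ | p
  · rw [hf] at hd; simp at hd
  · have := List.find?_some hf
    have hx : p.1 = x := by simpa using this
    exact List.mem_map.mpr ⟨p, List.mem_of_find?_eq_some hf, hx⟩

theorem rk_lt {dm : List (String × List String)} {x d : String}
    (hd : d ∈ depsOf dm x) (hnc : NoCyc dm x) : rk dm d < rk dm x := by
  have hxk : x ∈ dm.map Prod.fst := key_of_depsOf hd
  have hsub : RKs dm d ⊆ RKs dm x := by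
    rintro k ⟨hk, rfl | hrk⟩
    · exact ⟨hk, Or.inr (Rp.single hd)⟩
    · exact ⟨hk, Or.inr (Rp.head hd hrk)⟩
  have hxin : x ∈ RKs dm x := ⟨hxk, Or.inl rfl⟩
  have hxout : x ∉ RKs dm d := by
    rintro ⟨-, rfl | hrk⟩
    · exact hnc x (Or.inl rfl) (Rp.single hd)
    · exact hnc x (Or.inl rfl) (Rp.head hd hrk)
  exact Set.ncard_lt_ncard ⟨hsub, fun hb => hxout (hb hxin)⟩ (RKs_finite dm x)

-- ---- fuel adequacy: on cycle-free nodes neither DFS runs out of fuel ----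
theorem ctdA_isSome {dm : List (String × List String)} :
    ∀ (f : Nat) (x : String) (cache : PySem.Dict String (PySem.Set String)),
      NoCyc dm x → rk dm x < f → (ctdA dm f x cache).isSome := by
  intro f
  induction f with
  | zero => intro x cache _ h; omega
  | succ f ih =>
    intro x cache hnc hrk
    rw [ctdA]
    rcases PySem.Dict.get? cache x with _ | r
    · have hfold : ∀ (l : List String), (∀ d ∈ l, d ∈ depsOf dm x) →
          ∀ (acc : PySem.Set String) (c : PySem.Dict String (PySem.Set String)),
            (ctdAFold dm f l acc c).isSome := by
        intro l
        induction l with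
        | nil => intro _ acc c; rw [ctdAFold]; rfl
        | cons d rest ihl =>
          intro hl acc c
          rw [ctdAFold]
          have hd := hl d (List.mem_cons_self ..)
          have h1 : (ctdA dm f d c).isSome :=
            ih d c (NoCyc_dep hnc hd) (by have := rk_lt hd hnc; omega)
          rcases hh : ctdA dm f d c with _ | ⟨sub, c1⟩
          · rw [hh] at h1; simp at h1
          · exact ihl (fun e he => hl e (List.mem_cons_of_mem _ he)) _ _
      have := hfold (depsOf dm x) (fun d hd => hd) PySem.Set.empty cache
      rcases hh : ctdAFold dm f (depsOf dm x) PySem.Set.empty cache with _ | ⟨res, c1⟩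
      · rw [hh] at this; simp at this
      · simp
    · rfl

theorem mrpB_isSome {dm : List (String × List String)} {pos : PySem.Dict String Int} :
    ∀ (f : Nat) (x : String) (memo : PySem.Dict String Int),
      NoCyc dm x → rk dm x < f → (mrpB dm pos f x memo).isSome := by
  intro f
  induction f with
  | zero => intro x memo _ h; omega
  | succ f ih =>
    intro x memo hnc hrk
    rw [mrpB]
    rcases PySem.Dict.get? memo x with _ | m
    · have hfold : ∀ (l : List String), (∀ d ∈ l, d ∈ depsOf dm x) →
          ∀ (acc : Int) (c : PySem.Dict String Int),
            (mrpBFold dm pos f l acc c).isSome := by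
        intro l
        induction l with
        | nil => intro _ acc c; rw [mrpBFold]; rfl
        | cons d rest ihl =>
          intro hl acc c
          rw [mrpBFold]
          have hd := hl d (List.mem_cons_self ..)
          have h1 : (mrpB dm pos f d c).isSome :=
            ih d c (NoCyc_dep hnc hd) (by have := rk_lt hd hnc; omega)
          rcases hh : mrpB dm pos f d c with _ | ⟨r, c1⟩
          · rw [hh] at h1; simp at h1
          · exact ihl (fun e he => hl e (List.mem_cons_of_mem _ he)) _ _
      have := hfold (depsOf dm x) (fun d hd => hd) (PySem.Dict.getD pos x (-1)) memo
      rcases hh : mrpBFold dm pos f (depsOf dm x) (PySem.Dict.getD pos x (-1)) memo with _ | ⟨m, c1⟩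
      · rw [hh] at this; simp at this
      · simp
    · rfl

-- ---- correctness of A's memoized closure ----
def CacheOK (dm : List (String × List String)) (cache : PySem.Dict String (PySem.Set String)) : Prop :=
  ∀ k S, PySem.Dict.get? cache k = some S → ∀ y, y ∈ S ↔ Rp dm k y

theorem ctdAFold_correct {dm : List (String × List String)} {f : Nat}
    (hrec : ∀ (x : String) cache S cache', CacheOK dm cache → ctdA dm f x cache = some (S, cache') →
      CacheOK dm cache' ∧ (∀ y, y ∈ S ↔ Rp dm x y)) :
    ∀ (l : List String) (acc : PySem.Set String) c res c', CacheOK dm c →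
      ctdAFold dm f l acc c = some (res, c') →
      CacheOK dm c' ∧ (∀ y, y ∈ res ↔ y ∈ acc ∨ ∃ d ∈ l, y = d ∨ Rp dm d y) := by
  intro l
  induction l with
  | nil =>
    intro acc c res c' hok h
    rw [ctdAFold] at h
    rw [Option.some.injEq, Prod.mk.injEq] at h
    obtain ⟨rfl, rfl⟩ := h
    exact ⟨hok, by simp⟩
  | cons d rest ih =>
    intro acc c res c' hok h
    rw [ctdAFold] at h
    rcases hh : ctdA dm f d c with _ | ⟨sub, c1⟩ <;> rw [hh] at h
    · exact absurd h (by simp)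
    · obtain ⟨hok1, hsub⟩ := hrec d c sub c1 hok hh
      obtain ⟨hok', hres⟩ := ih _ _ _ _ hok1 h
      refine ⟨hok', fun y => ?_⟩
      rw [hres y, PySem.Set.mem_union, PySem.Set.mem_add, hsub y]
      constructor
      · rintro (((hy | heq) | hy) | ⟨e, he, hy⟩)
        · exact Or.inl hy
        · exact Or.inr ⟨d, List.mem_cons_self .., Or.inl heq⟩
        · exact Or.inr ⟨d, List.mem_cons_self .., Or.inr hy⟩
        · exact Or.inr ⟨e, List.mem_cons_of_mem _ he, hy⟩
      · rintro (hy | ⟨e, he, hy⟩)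
        · exact Or.inl (Or.inl (Or.inl hy))
        · rcases List.mem_cons.mp he with rfl | he
          · rcases hy with rfl | hy
            · exact Or.inl (Or.inl (Or.inr rfl))
            · exact Or.inl (Or.inr hy)
          · exact Or.inr ⟨e, he, hy⟩

theorem ctdA_correct {dm : List (String × List String)} :
    ∀ (f : Nat) (x : String) cache S cache', CacheOK dm cache →
      ctdA dm f x cache = some (S, cache') →
      CacheOK dm cache' ∧ (∀ y, y ∈ S ↔ Rp dm x y) := by
  intro f
  induction f with
  | zero => intro x cache S cache' _ h; rw [ctdA] at h; exact absurd h (by simp)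
  | succ f ih =>
    intro x cache S cache' hok h
    rw [ctdA] at h
    rcases hget : PySem.Dict.get? cache x with _ | r <;> rw [hget] at h
    · rcases hfold : ctdAFold dm f (depsOf dm x) PySem.Set.empty cache with _ | ⟨res, c1⟩ <;>
        rw [hfold] at h
      · exact absurd h (by simp)
      · rw [Option.some.injEq, Prod.mk.injEq] at h
        obtain ⟨rfl, rfl⟩ := h
        obtain ⟨hok1, hres⟩ := ctdAFold_correct ih _ _ _ _ _ hok hfold
        have hmem : ∀ y, y ∈ res ↔ Rp dm x y := by
          intro y
          rw [hres y, Rp_iff]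
          constructor
          · rintro (h | ⟨d, hd, h2⟩)
            · simp [PySem.Set.empty] at h
            · exact ⟨d, hd, h2.imp Eq.symm id⟩
          · rintro ⟨d, hd, h2⟩
            exact Or.inr ⟨d, hd, h2.imp Eq.symm id⟩
        refine ⟨fun k T hkT y => ?_, hmem⟩
        rcases eq_or_ne k x with rfl | hne
        · rw [PySem.Dict.get?_insert_self] at hkT
          injection hkT with hkT; subst hkT
          exact hmem y
        · rw [PySem.Dict.get?_insert_of_ne _ _ hne] at hkT
          exact hok1 k T hkT y
    · rw [Option.some.injEq, Prod.mk.injEq] at h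
      obtain ⟨rfl, rfl⟩ := h
      exact ⟨hok, hok x _ hget⟩

-- ---- correctness of B's memoized max-position ----
def MaxSpec (dm : List (String × List String)) (pos : PySem.Dict String Int)
    (x : String) (m : Int) : Prop :=
  (∀ y p, (y = x ∨ Rp dm x y) → PySem.Dict.get? pos y = some p → p ≤ m) ∧
  (m = -1 ∨ ∃ y, (y = x ∨ Rp dm x y) ∧ PySem.Dict.get? pos y = some m)

def MemoOK (dm : List (String × List String)) (pos : PySem.Dict String Int)
    (memo : PySem.Dict String Int) : Prop :=
  ∀ k m, PySem.Dict.get? memo k = some m → MaxSpec dm pos k m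

theorem mrpBFold_correct {dm : List (String × List String)} {pos : PySem.Dict String Int} {f : Nat}
    (hrec : ∀ (x : String) memo m memo', MemoOK dm pos memo → mrpB dm pos f x memo = some (m, memo') →
      MemoOK dm pos memo' ∧ MaxSpec dm pos x m) :
    ∀ (l : List String) (acc : Int) c m c', MemoOK dm pos c →
      mrpBFold dm pos f l acc c = some (m, c') →
      MemoOK dm pos c' ∧ acc ≤ m ∧
      (∀ d ∈ l, ∀ y p, (y = d ∨ Rp dm d y) → PySem.Dict.get? pos y = some p → p ≤ m) ∧
      (m = acc ∨ m = -1 ∨ ∃ d ∈ l, ∃ y, (y = d ∨ Rp dm d y) ∧ PySem.Dict.get? pos y = some m) := by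
  intro l
  induction l with
  | nil =>
    intro acc c m c' hok h
    rw [mrpBFold] at h
    rw [Option.some.injEq, Prod.mk.injEq] at h
    obtain ⟨rfl, rfl⟩ := h
    exact ⟨hok, le_refl _, by simp, Or.inl rfl⟩
  | cons d rest ih =>
    intro acc c m c' hok h
    rw [mrpBFold] at h
    rcases hh : mrpB dm pos f d c with _ | ⟨r, c1⟩ <;> rw [hh] at h
    · exact absurd h (by simp)
    · obtain ⟨hok1, hub, hwit⟩ := hrec d c r c1 hok hh
      obtain ⟨hok', hle, hubs, hw⟩ := ih _ _ _ _ hok1 h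
      have hacc2 : acc ≤ (if acc < r then r else acc) := by split <;> omega
      have hr2 : r ≤ (if acc < r then r else acc) := by split <;> omega
      refine ⟨hok', le_trans hacc2 hle, ?_, ?_⟩
      · intro e he y p hy hp
        rcases List.mem_cons.mp he with rfl | he
        · exact le_trans (hub y p hy hp) (le_trans hr2 hle)
        · exact hubs e he y p hy hp
      · rcases hw with hm | hm | ⟨e, he, hy⟩
        · subst hm
          by_cases hcase : acc < r
          · rw [if_pos hcase]
            rcases hwit with rfl | ⟨y, hy, hp⟩
            · exact Or.inr (Or.inl rfl)
            · exact Or.inr (Or.inr ⟨d, List.mem_cons_self .., y, hy, hp⟩)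
          · rw [if_neg hcase]
            exact Or.inl rfl
        · exact Or.inr (Or.inl hm)
        · exact Or.inr (Or.inr ⟨e, List.mem_cons_of_mem _ he, hy⟩)

theorem mrpB_correct {dm : List (String × List String)} {pos : PySem.Dict String Int} :
    ∀ (f : Nat) (x : String) memo m memo', MemoOK dm pos memo →
      mrpB dm pos f x memo = some (m, memo') →
      MemoOK dm pos memo' ∧ MaxSpec dm pos x m := by
  intro f
  induction f with
  | zero => intro x memo m memo' _ h; rw [mrpB] at h; exact absurd h (by simp)
  | succ f ih =>
    intro x memo m memo' hok h
    rw [mrpB] at h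
    rcases hget : PySem.Dict.get? memo x with _ | m0 <;> rw [hget] at h
    · rcases hfold : mrpBFold dm pos f (depsOf dm x) (PySem.Dict.getD pos x (-1)) memo
          with _ | ⟨res, c1⟩ <;> rw [hfold] at h
      · exact absurd h (by simp)
      · rw [Option.some.injEq, Prod.mk.injEq] at h
        obtain ⟨rfl, rfl⟩ := h
        obtain ⟨hok1, hle, hub, hw⟩ := mrpBFold_correct ih _ _ _ _ _ hok hfold
        have hspec : MaxSpec dm pos x res := by
          constructor
          · intro y p hy hp
            rcases hy with rfl | hy
            · have : PySem.Dict.getD pos y (-1) = p := PySem.Dict.getD_of_get?_eq_some _ _ hp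
              omega
            · obtain ⟨d, hd, hdy⟩ := Rp_iff.mp hy
              exact hub d hd y p (hdy.imp Eq.symm id) hp
          · rcases hw with hm | hm | ⟨d, hd, y, hy, hp⟩
            · rcases hget2 : PySem.Dict.get? pos x with _ | p
              · have : PySem.Dict.getD pos x (-1) = -1 := PySem.Dict.getD_of_get?_eq_none _ _ hget2
                omega
              · have hgd : PySem.Dict.getD pos x (-1) = p := PySem.Dict.getD_of_get?_eq_some _ _ hget2
                subst hm
                exact Or.inr ⟨x, Or.inl rfl, by rw [hget2, hgd]⟩
            · exact Or.inl hm
            · refine Or.inr ⟨y, Or.inr ?_, hp⟩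
              rcases hy with rfl | hy
              · exact Rp.single hd
              · exact Rp.head hd hy
        refine ⟨fun k mk hkm => ?_, hspec⟩
        rcases eq_or_ne k x with rfl | hne
        · rw [PySem.Dict.get?_insert_self] at hkm
          injection hkm with hkm; subst hkm
          exact hspec
        · rw [PySem.Dict.get?_insert_of_ne _ _ hne] at hkm
          exact hok1 k mk hkm
    · rw [Option.some.injEq, Prod.mk.injEq] at h
      obtain ⟨rfl, rfl⟩ := h
      exact ⟨hok, hok x _ hget⟩

-- ---- the shared pos dict ----
theorem pyPosAux_not_mem :
    ∀ (l : List String) (s : Int) (d : PySem.Dict String Int) (name : String), name ∉ l →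
      ((PySem.List.enumerate l s).foldl (fun d p => d.insert p.2 p.1) d).get? name = d.get? name := by
  intro l
  induction l with
  | nil => intro s d name _; rw [PySem.List.enumerate_nil]; rfl
  | cons x xs ih =>
    intro s d name hnm
    rw [PySem.List.enumerate_cons, List.foldl_cons]
    rw [ih (s+1) _ name (fun h => hnm (List.mem_cons_of_mem _ h))]
    exact PySem.Dict.get?_insert_of_ne _ _ (fun h => hnm (h ▸ List.mem_cons_self ..))

theorem pyPosAux_mem :
    ∀ (l : List String) (s : Int) (d : PySem.Dict String Int) (name : String), name ∈ l →
      ∃ i, ((PySem.List.enumerate l s).foldl (fun d p => d.insert p.2 p.1) d).get? name = some i ∧ s ≤ i := by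
  intro l
  induction l with
  | nil => intro s d name h; exact absurd h (List.not_mem_nil)
  | cons x xs ih =>
    intro s d name hnm
    rw [PySem.List.enumerate_cons, List.foldl_cons]
    by_cases hm : name ∈ xs
    · obtain ⟨i, hi, hsi⟩ := ih (s+1) (d.insert x s) name hm
      exact ⟨i, hi, by omega⟩
    · rcases List.mem_cons.mp hnm with rfl | hmem
      · refine ⟨s, ?_, le_refl _⟩
        rw [pyPosAux_not_mem xs (s+1) _ name hm]
        exact PySem.Dict.get?_insert_self _ _ _
      · exact absurd hmem hm

theorem pyPos_mem {ordering : List String} {name : String} (h : name ∈ ordering) :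
    ∃ i, (pyPos ordering).get? name = some i ∧ 0 ≤ i :=
  pyPosAux_mem ordering 0 PySem.Dict.empty name h

-- ---- the per-name violation condition, as one existential over the input graph ----
def Viol (dm : List (String × List String)) (pos : PySem.Dict String Int)
    (name : String) (pn : Int) : Prop :=
  ∃ d ∈ depsOf dm name, ∃ y, (y = d ∨ Rp dm d y) ∧ ∃ p, PySem.Dict.get? pos y = some p ∧ pn ≤ p

theorem viol_iff_Rp {dm : List (String × List String)} {pos : PySem.Dict String Int}
    {name : String} {pn : Int} :
    Viol dm pos name pn ↔ ∃ dep, Rp dm name dep ∧ ∃ p, PySem.Dict.get? pos dep = some p ∧ pn ≤ p := by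
  constructor
  · rintro ⟨d, hd, y, hy, p, hp, hpn⟩
    refine ⟨y, ?_, p, hp, hpn⟩
    rcases hy with rfl | hy
    · exact Rp.single hd
    · exact Rp.head hd hy
  · rintro ⟨dep, hdep, p, hp, hpn⟩
    obtain ⟨d, hd, hddep⟩ := Rp_iff.mp hdep
    exact ⟨d, hd, dep, hddep.imp Eq.symm id, p, hp, hpn⟩

theorem isvBDeps_spec {dm : List (String × List String)} {pos : PySem.Dict String Int} :
    ∀ (l : List String) (pn : Int) (memo : PySem.Dict String Int), MemoOK dm pos memo →
      (∀ d ∈ l, NoCyc dm d) → 0 ≤ pn →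
      ∃ b memo', isvBDeps dm pos l pn memo = some (b, memo') ∧ MemoOK dm pos memo' ∧
        (b = false ↔ ∃ d ∈ l, ∃ y, (y = d ∨ Rp dm d y) ∧ ∃ p, PySem.Dict.get? pos y = some p ∧ pn ≤ p) := by
  intro l
  induction l with
  | nil =>
    intro pn memo hok _ _
    refine ⟨true, memo, by rw [isvBDeps], hok, by simp⟩
  | cons d rest ih =>
    intro pn memo hok hnc hpn
    have hsome : (mrpB dm pos (dm.length + 1) d memo).isSome :=
      mrpB_isSome _ d memo (hnc d (List.mem_cons_self ..)) (by have := rk_le dm d; omega)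
    rcases hh : mrpB dm pos (dm.length + 1) d memo with _ | ⟨r, memo1⟩
    · rw [hh] at hsome; simp at hsome
    · obtain ⟨hok1, hub, hwit⟩ := mrpB_correct _ d memo r memo1 hok hh
      by_cases hcase : pn ≤ r
      · refine ⟨false, memo1, ?_, hok1, ?_⟩
        · rw [isvBDeps, hh]; simp [hcase]
        · simp only [true_iff]
          have hr : r ≠ -1 := by omega
          rcases hwit with hm | ⟨y, hy, hp⟩
          · exact absurd hm hr
          · exact ⟨d, List.mem_cons_self .., y, hy, r, hp, hcase⟩
      · obtain ⟨b, memo', hB, hok', hiff⟩ :=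
          ih pn memo1 hok1 (fun e he => hnc e (List.mem_cons_of_mem _ he)) hpn
        refine ⟨b, memo', ?_, hok', ?_⟩
        · rw [isvBDeps, hh]; simp [hcase, hB]
        · rw [hiff]
          constructor
          · rintro ⟨e, he, hy⟩; exact ⟨e, List.mem_cons_of_mem _ he, hy⟩
          · rintro ⟨e, he, y, hy, p, hp, hpnle⟩
            rcases List.mem_cons.mp he with rfl | he
            · exfalso
              have : p ≤ r := hub y p hy hp
              omega
            · exact ⟨e, he, y, hy, p, hp, hpnle⟩

-- ---- the two outer loops agree ----
theorem loops_eq {dm : List (String × List String)} {pos : PySem.Dict String Int} :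
    ∀ (rest : List String) (cache : PySem.Dict String (PySem.Set String)) (memo : PySem.Dict String Int),
      CacheOK dm cache → MemoOK dm pos memo →
      (∀ n ∈ rest, NoCyc dm n) →
      (∀ n ∈ rest, ∃ i, PySem.Dict.get? pos n = some i ∧ 0 ≤ i) →
      isvALoop dm pos rest cache = isvBLoop dm pos rest memo := by
  intro rest
  induction rest with
  | nil => intro cache memo _ _ _ _; rw [isvALoop, isvBLoop]
  | cons name rest ih =>
    intro cache memo hcok hmok hnc hpos
    have hncn := hnc name (List.mem_cons_self ..)
    obtain ⟨i, hi, hi0⟩ := hpos name (List.mem_cons_self ..)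
    have hgd : PySem.Dict.getD pos name 0 = i := PySem.Dict.getD_of_get?_eq_some _ _ hi
    have hsome : (ctdA dm (dm.length + 1) name cache).isSome :=
      ctdA_isSome _ name cache hncn (by have := rk_le dm name; omega)
    rcases hA : ctdA dm (dm.length + 1) name cache with _ | ⟨tdeps, cache1⟩
    · rw [hA] at hsome; simp at hsome
    · obtain ⟨hcok1, htd⟩ := ctdA_correct _ name cache tdeps cache1 hcok hA
      obtain ⟨b, memo', hB, hmok', hbiff⟩ :=
        isvBDeps_spec (depsOf dm name) i memo hmok
          (fun d hd => NoCyc_dep hncn hd) hi0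
      have hany : (tdeps.any (fun dep =>
            match PySem.Dict.get? pos dep with
            | some pd => i ≤ pd
            | none => false) = true) ↔ Viol dm pos name i := by
        rw [List.any_eq_true, viol_iff_Rp]
        constructor
        · rintro ⟨dep, hdep, hpred⟩
          refine ⟨dep, (htd dep).mp hdep, ?_⟩
          rcases hp : PySem.Dict.get? pos dep with _ | p <;> rw [hp] at hpred
          · simp at hpred
          · exact ⟨p, rfl, by simpa using hpred⟩
        · rintro ⟨dep, hdep, p, hp, hpn⟩
          refine ⟨dep, (htd dep).mpr hdep, ?_⟩
          rw [hp]
          simpa using hpn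
      rw [isvALoop, isvBLoop, hA, hgd, hB]
      by_cases hv : Viol dm pos name i
      · have h1 : (tdeps.any fun dep =>
            match PySem.Dict.get? pos dep with
            | some pd => i ≤ pd
            | none => false) = true := hany.mpr hv
        have h2 : b = false := hbiff.mpr hv
        subst h2
        simp [h1]
      · have h1 : (tdeps.any fun dep =>
            match PySem.Dict.get? pos dep with
            | some pd => i ≤ pd
            | none => false) = false := by
          rcases hb : (tdeps.any fun dep =>
            match PySem.Dict.get? pos dep with
            | some pd => i ≤ pd
            | none => false) with _ | _
          · rfl
          · exact absurd (hany.mp hb) hv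
        have h2 : b = true := by
          rcases hb2 : b with _ | _
          · exact absurd (hbiff.mp hb2) hv
          · rfl
        subst h2
        simp only [h1, Bool.false_eq_true, if_false]
        exact ih cache1 memo' hcok1 hmok'
          (fun n hn => hnc n (List.mem_cons_of_mem _ hn))
          (fun n hn => hpos n (List.mem_cons_of_mem _ hn))

-- ===== VERDICT (by name: the statement is the Claim_ definition above) =====

theorem is_valid_ordering_spec : Claim_equal_is_valid_ordering := by
  unfold Claim_equal_is_valid_ordering
  intro ordering dm _ hpre
  unfold Spec_is_valid_ordering is_valid_ordering is_valid_ordering_alt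
  apply loops_eq
  · intro k S h _; rw [PySem.Dict.get?_empty] at h; exact absurd h (by simp)
  · intro k m h; rw [PySem.Dict.get?_empty] at h; exact absurd h (by simp)
  · exact Pre_NoCyc hpre
  · intro n hn; exact pyPos_mem hn
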